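-- pv_equiv track=rewrite | github.com/KimYjoo/MasterOfAlgorithm | silver/B4659/src.py | main_algo
-- ===== SOURCE A (Python) =====
-- from collections import deque
--
-- def main_algo(word):
--     mo = ['a', 'e', 'i', 'o', 'u']
--     bag_mo = deque()
--     bag_ja = deque()
--     count_mo = 0
--     for i in word:
--         if i in mo:
--             count_mo += 1
--             if bag_ja: bag_ja.clear()
--             bag_mo.append(i)
--             if len(bag_mo) == 2 and bag_mo[0] == bag_mo[1] and bag_mo[0] != 'e' and bag_mo[0] != 'o':
--                 return False
--         else:
--             if bag_mo: bag_mo.clear()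
--             bag_ja.append(i)
--             if len(bag_ja) == 2 and bag_ja[0] == bag_ja[1]:
--                 return False
--         if len(bag_ja) >= 3 or len(bag_mo) >= 3:
--             return False
--     if count_mo > 0:
--         return True
--     else:
--         return False
-- ===== SOURCE B (Python) =====
-- def main_algo(word):
--     has_vowel = False
--     n = len(word)
--     i = 0
--     while i < n:
--         is_v = word[i] in "aeiou"
--         j = i
--         while j < n and (word[j] in "aeiou") == is_v:
--             j += 1
--         if is_v:
--             has_vowel = True
--         run = j - i
--         if run >= 3:
--             return False
--         if run == 2 and word[i] == word[i + 1]: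
--             if not (is_v and (word[i] == 'e' or word[i] == 'o')):
--                 return False
--         i = j
--     return has_vowel
-- ===== Notes on version B (the rewrite author's own statement) =====
-- stated objective: alternative
-- what changed: B replaces A's char-by-char simulation with two deques and a counter by a run-based scan: it finds each maximal vowel/consonant run with an inner scan and judges the run from its length and first two characters.
import Mathlib
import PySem

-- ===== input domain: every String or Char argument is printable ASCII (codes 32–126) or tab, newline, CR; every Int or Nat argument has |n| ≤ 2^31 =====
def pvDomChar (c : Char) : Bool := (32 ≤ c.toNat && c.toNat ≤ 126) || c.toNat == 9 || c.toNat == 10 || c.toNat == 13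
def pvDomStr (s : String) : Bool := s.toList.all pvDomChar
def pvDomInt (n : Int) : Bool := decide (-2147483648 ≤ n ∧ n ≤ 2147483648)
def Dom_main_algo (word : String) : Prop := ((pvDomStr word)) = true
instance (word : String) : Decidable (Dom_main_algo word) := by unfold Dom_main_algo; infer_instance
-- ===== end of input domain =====

-- B is a run-based re-decomposition of A's character-by-character deque simulation; same cost, different structure.

-- ===== PORT A =====
-- literal transliteration of A's for-loop: state = (bag_mo, bag_ja, count_mo);
-- deque indexing bag[0]/bag[1] is done with List.get? under the length==2 guard (exact there)
def mainAlgoLoopA : List Char → List Char → List Char → Int → Bool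
  | [], _, _, count_mo => decide (count_mo > 0)
  | i :: rest, bag_mo, bag_ja, count_mo =>
    if (['a', 'e', 'i', 'o', 'u'] : List Char).contains i then
      let count_mo := count_mo + 1
      let bag_ja := if bag_ja.isEmpty then bag_ja else []
      let bag_mo := bag_mo ++ [i]
      if bag_mo.length == 2 && bag_mo[0]? == bag_mo[1]? && bag_mo[0]? != some 'e'
          && bag_mo[0]? != some 'o' then
        false
      else if bag_ja.length ≥ 3 ∨ bag_mo.length ≥ 3 then false
      else mainAlgoLoopA rest bag_mo bag_ja count_mo
    else
      let bag_mo := if bag_mo.isEmpty then bag_mo else []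
      let bag_ja := bag_ja ++ [i]
      if bag_ja.length == 2 && bag_ja[0]? == bag_ja[1]? then false
      else if bag_ja.length ≥ 3 ∨ bag_mo.length ≥ 3 then false
      else mainAlgoLoopA rest bag_mo bag_ja count_mo

def main_algo (word : String) : Bool :=
  mainAlgoLoopA word.toList [] [] 0

-- ===== PORT B =====
def mainAlgoAltIsV (c : Char) : Bool := "aeiou".toList.contains c

-- inner while loop of B: length of the maximal same-type prefix, and the remainder
def mainAlgoAltSpan (v : Bool) : List Char → Nat × List Char
  | [] => (0, [])
  | c :: rest =>
    if mainAlgoAltIsV c == v then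
      let p := mainAlgoAltSpan v rest
      (p.1 + 1, p.2)
    else (0, c :: rest)

lemma mainAlgoAltSpan_len (v : Bool) (l : List Char) :
    (mainAlgoAltSpan v l).2.length ≤ l.length := by
  induction l with
  | nil => simp [mainAlgoAltSpan]
  | cons c rest ih =>
    simp only [mainAlgoAltSpan]
    split
    · simpa using Nat.le_succ_of_le ih
    · simp

-- outer while loop of B: one maximal run per step
def mainAlgoLoopB : List Char → Bool → Bool
  | [], has_vowel => has_vowel
  | c :: rest, has_vowel =>
    let v := mainAlgoAltIsV c
    let p := mainAlgoAltSpan v rest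
    let has_vowel := has_vowel || v
    let run := p.1 + 1
    if run ≥ 3 then false
    else if run == 2 && rest.head? == some c && !(v && (c == 'e' || c == 'o')) then false
    else mainAlgoLoopB p.2 has_vowel
termination_by l _ => l.length
decreasing_by
  exact Nat.lt_succ_of_le (mainAlgoAltSpan_len _ _)

def main_algo_alt (word : String) : Bool :=
  mainAlgoLoopB word.toList false

-- ===== PRECONDITION & SPEC =====
def Spec_main_algo (word : String) (out : Bool) : Prop := out = main_algo_alt word
instance (word : String) (out : Bool) : Decidable (Spec_main_algo word out) := by unfold Spec_main_algo; infer_instance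

-- ===== CLAIM (what is proved, stated in full; the proofs are below) =====
def Claim_equal_main_algo : Prop := ∀ (word : String), Dom_main_algo word → Spec_main_algo word (main_algo word)

-- ===== LEMMAS AND PROOFS =====

-- A's leftover vowel bag is irrelevant when the next char is a consonant
lemma clear_mo (d : Char) (t : List Char) (bag : List Char) (count : Int)
    (h : mainAlgoAltIsV d = false) :
    mainAlgoLoopA (d :: t) bag [] count = mainAlgoLoopA (d :: t) [] [] count := by
  simp [mainAlgoAltIsV] at h
  cases bag <;> simp [mainAlgoLoopA, h]

-- A's leftover consonant bag is irrelevant when the next char is a vowel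
lemma clear_ja (d : Char) (t : List Char) (bag : List Char) (count : Int)
    (h : mainAlgoAltIsV d = true) :
    mainAlgoLoopA (d :: t) [] bag count = mainAlgoLoopA (d :: t) [] [] count := by
  simp [mainAlgoAltIsV] at h
  cases bag <;> simp [mainAlgoLoopA, h]

lemma main_eq : ∀ (n : Nat) (l : List Char), l.length ≤ n → ∀ count : Int, 0 ≤ count →
    mainAlgoLoopA l [] [] count = mainAlgoLoopB l (decide (0 < count)) := by
  intro n
  induction n with
  | zero =>
    intro l hl count hc
    have : l = [] := List.eq_nil_of_length_eq_zero (Nat.le_zero.mp hl)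
    subst this
    simp [mainAlgoLoopA, mainAlgoLoopB]
  | succ n ih =>
    intro l hl count hc
    match l with
    | [] => simp [mainAlgoLoopA, mainAlgoLoopB]
    | c :: rest =>
      have hrest : rest.length ≤ n := by simpa using Nat.lt_succ_iff.mp (Nat.lt_of_lt_of_le (by simp) hl)
      cases hv : mainAlgoAltIsV c with
      | true =>
        have hv' := hv; simp [mainAlgoAltIsV] at hv'
        match rest with
        | [] =>
          have h01 : (0:Int) < count + 1 := by omega
          simp [mainAlgoLoopA, mainAlgoLoopB, mainAlgoAltSpan, hv, hv', h01]
        | c1 :: r2 =>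
          cases h1 : mainAlgoAltIsV c1 with
          | false =>
            rw [show mainAlgoLoopA (c :: c1 :: r2) [] [] count
                  = mainAlgoLoopA (c1 :: r2) [c] [] (count + 1) by
                simp [mainAlgoLoopA, hv']]
            rw [clear_mo c1 r2 [c] (count + 1) h1]
            rw [ih _ hrest (count + 1) (by omega)]
            rw [show mainAlgoLoopB (c :: c1 :: r2) (decide (0 < count))
                  = mainAlgoLoopB (c1 :: r2) (decide (0 < count) || true) by
                simp [mainAlgoLoopB, mainAlgoAltSpan, hv, h1]]
            congr 1
            simp; omega
          | true =>
            have h1' := h1; simp [mainAlgoAltIsV] at h1'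
            match r2 with
            | [] =>
              have h02 : (0:Int) < count + 1 + 1 := by omega
              simp [mainAlgoLoopA, mainAlgoLoopB, mainAlgoAltSpan, hv, hv', h1, h1', h02]
              rcases eq_or_ne c c1 with hcc | hcc
              · subst hcc; simp
              · simp [hcc, hcc.symm]
            | c2 :: r3 =>
              cases h2 : mainAlgoAltIsV c2 with
              | true =>
                have h2' := h2; simp [mainAlgoAltIsV] at h2'
                simp [mainAlgoLoopA, mainAlgoLoopB, mainAlgoAltSpan, hv, hv', h1, h1', h2, h2']
              | false =>
                have hn2 : (c2 :: r3).length ≤ n := le_trans (by simp) hrest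
                have e2 := ih (c2 :: r3) hn2 (count + 1 + 1) (by omega)
                have hb : decide (0 < count + 1 + 1) = (decide (0 < count) || true) := by
                  simp; omega
                rw [hb] at e2
                have ecl := clear_mo c2 r3 [c, c1] (count + 1 + 1) h2
                have hsp : mainAlgoAltSpan true (c1 :: c2 :: r3) = (1, c2 :: r3) := by
                  simp [mainAlgoAltSpan, h1, h2]
                by_cases hcc : c = c1
                · subst hcc
                  by_cases heo : c = 'e' ∨ c = 'o'
                  · have hA : mainAlgoLoopA (c :: c :: c2 :: r3) [] [] count
                        = mainAlgoLoopA (c2 :: r3) [c, c] [] (count + 1 + 1) := by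
                      rcases heo with he | he <;> subst he <;> simp [mainAlgoLoopA]
                    have hB : mainAlgoLoopB (c :: c :: c2 :: r3) (decide (0 < count))
                        = mainAlgoLoopB (c2 :: r3) (decide (0 < count) || true) := by
                      rcases heo with he | he <;> subst he <;>
                        simp [mainAlgoLoopB, hsp, hv]
                    rw [hA, ecl, e2, hB]
                  · push Not at heo
                    have hv'' : c = 'a' ∨ c = 'i' ∨ c = 'u' := by
                      rcases hv' with h | h | h | h | h <;> simp_all
                    simp [mainAlgoLoopA, mainAlgoLoopB, hsp, hv, hv'', heo.1, heo.2]
                · have hA : mainAlgoLoopA (c :: c1 :: c2 :: r3) [] [] count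
                      = mainAlgoLoopA (c2 :: r3) [c, c1] [] (count + 1 + 1) := by
                    simp [mainAlgoLoopA, hv', h1', hcc]
                  have hB : mainAlgoLoopB (c :: c1 :: c2 :: r3) (decide (0 < count))
                      = mainAlgoLoopB (c2 :: r3) (decide (0 < count) || true) := by
                    simp [mainAlgoLoopB, hsp, hv, Ne.symm hcc]
                  rw [hA, ecl, e2, hB]
      | false =>
        have hv' := hv; simp [mainAlgoAltIsV] at hv'
        match rest with
        | [] =>
          simp [mainAlgoLoopA, mainAlgoLoopB, mainAlgoAltSpan, hv, hv']
        | c1 :: r2 =>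
          cases h1 : mainAlgoAltIsV c1 with
          | true =>
            rw [show mainAlgoLoopA (c :: c1 :: r2) [] [] count
                  = mainAlgoLoopA (c1 :: r2) [] [c] count by
                simp [mainAlgoLoopA, hv']]
            rw [clear_ja c1 r2 [c] count h1]
            rw [ih _ hrest count hc]
            rw [show mainAlgoLoopB (c :: c1 :: r2) (decide (0 < count))
                  = mainAlgoLoopB (c1 :: r2) (decide (0 < count) || false) by
                simp [mainAlgoLoopB, mainAlgoAltSpan, hv, h1]]
            simp
          | false =>
            have h1' := h1; simp [mainAlgoAltIsV] at h1'
            match r2 with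
            | [] =>
              simp [mainAlgoLoopA, mainAlgoLoopB, mainAlgoAltSpan, hv, hv', h1, h1']
              rcases eq_or_ne c c1 with hcc | hcc
              · subst hcc; simp
              · simp [hcc, hcc.symm]
            | c2 :: r3 =>
              cases h2 : mainAlgoAltIsV c2 with
              | false =>
                have h2' := h2; simp [mainAlgoAltIsV] at h2'
                simp [mainAlgoLoopA, mainAlgoLoopB, mainAlgoAltSpan, hv, hv', h1, h1', h2, h2']
              | true =>
                have hn2 : (c2 :: r3).length ≤ n := le_trans (by simp) hrest
                have e2 := ih (c2 :: r3) hn2 count hc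
                have ecl := clear_ja c2 r3 [c, c1] count h2
                have hsp : mainAlgoAltSpan false (c1 :: c2 :: r3) = (1, c2 :: r3) := by
                  simp [mainAlgoAltSpan, h1, h2]
                by_cases hcc : c = c1
                · subst hcc
                  simp [mainAlgoLoopA, mainAlgoLoopB, hsp, hv, hv']
                · have hA : mainAlgoLoopA (c :: c1 :: c2 :: r3) [] [] count
                      = mainAlgoLoopA (c2 :: r3) [] [c, c1] count := by
                    simp [mainAlgoLoopA, hv', h1', hcc]
                  have hB : mainAlgoLoopB (c :: c1 :: c2 :: r3) (decide (0 < count))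
                      = mainAlgoLoopB (c2 :: r3) (decide (0 < count) || false) := by
                    simp [mainAlgoLoopB, hsp, hv, Ne.symm hcc]
                  rw [hA, ecl, e2, hB]
                  simp

-- ===== VERDICT (by name: the statement is the Claim_ definition above) =====
theorem main_algo_spec : Claim_equal_main_algo := by
  intro word _
  unfold Spec_main_algo main_algo main_algo_alt
  simpa using main_eq word.toList.length word.toList le_rfl 0 le_rfl
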